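-- pv_equiv track=rewrite | github.com/Christian-Mar/python_exercises | list_10.12.py | find_interlocked_pairs
-- ===== SOURCE A (Python) =====
-- def in_bisect(sorted_list, target):
--     """Uses binary search to check if target is in sorted_list."""
--     low = 0
--     high = len(sorted_list) - 1
--
--     while low <= high:
--         mid = (low + high) // 2
--         if sorted_list[mid] == target:
--             return True
--         elif sorted_list[mid] < target:
--             low = mid + 1
--         else:
--             high = mid - 1
--
--     return False
--
-- def extract_letters(word, start, step):
--     """Extracts every 'step' letter from word, starting at 'start'."""
--     return word[start::step]
--
-- def find_interlocked_pairs(words):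
--     """Finds all pairs of words that interlock to form another word."""
--     pairs = []
--     for word in words:
--         # Split word into alternating letters
--         word1 = extract_letters(word, 0, 2)  # even positions
--         word2 = extract_letters(word, 1, 2)  # odd positions
--         # Check if both halves are valid words
--         if in_bisect(words, word1) and in_bisect(words, word2):
--             pairs.append((word, word1, word2))
--     return pairs
-- ===== SOURCE B (Python) =====
-- def in_bisect(sorted_list, target):
--     """Divide-and-conquer binary search on list slices (same midpoint and
--     '<' comparison as the index-based version)."""
--     if not sorted_list:
--         return False
--     mid = (len(sorted_list) - 1) // 2
--     if sorted_list[mid] == target: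
--         return True
--     if sorted_list[mid] < target:
--         return in_bisect(sorted_list[mid + 1:], target)
--     return in_bisect(sorted_list[:mid], target)
--
-- def find_interlocked_pairs(words):
--     """Finds all pairs of words that interlock to form another word."""
--     return [(w, w[0::2], w[1::2])
--             for w in words
--             if in_bisect(words, w[0::2]) and in_bisect(words, w[1::2])]
-- ===== Notes on version B (the rewrite author's own statement) =====
-- stated objective: alternative
-- what changed: The iterative two-pointer binary search is replaced by a recursive divide-and-conquer search on list slices (empty-list base case, same midpoint element and '<' comparison, recursing into lst[mid+1:] or lst[:mid]), and the append loop of find_interlocked_pairs becomes a single list comprehension.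
import Mathlib
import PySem

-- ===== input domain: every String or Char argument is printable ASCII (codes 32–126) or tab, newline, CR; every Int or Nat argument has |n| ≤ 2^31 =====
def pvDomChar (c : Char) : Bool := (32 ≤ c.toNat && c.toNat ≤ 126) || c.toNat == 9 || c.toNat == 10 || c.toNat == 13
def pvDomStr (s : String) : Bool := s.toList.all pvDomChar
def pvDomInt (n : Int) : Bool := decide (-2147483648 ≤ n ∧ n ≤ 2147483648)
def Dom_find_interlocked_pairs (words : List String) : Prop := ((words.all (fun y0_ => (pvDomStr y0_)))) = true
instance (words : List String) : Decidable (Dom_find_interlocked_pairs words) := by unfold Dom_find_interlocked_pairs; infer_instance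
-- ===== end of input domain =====

-- B replaces the iterative two-pointer binary search by a recursive divide-and-conquer
-- search on list slices (same midpoint element, same '<' comparison) and the append loop
-- by a comprehension; alternative decomposition, same results, not claimed faster.


-- ===== PORT A =====
-- the while loop of in_bisect, state (low, high); the `none` arm of pyGet? is unreachable
-- (low ≤ mid ≤ high stays inside the list), it only makes the match total
def inBisectLoop (sorted_list : List String) (target : String) (low high : Int) : Bool :=
  if h : low ≤ high then
    let mid := PySem.Int.floordiv (low + high) 2
    match PySem.List.pyGet? sorted_list mid with
    | none => false
    | some x =>
      if x = target then true
      else if x < target then inBisectLoop sorted_list target (mid + 1) high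
      else inBisectLoop sorted_list target low (mid - 1)
  else false
termination_by (high + 1 - low).toNat
decreasing_by
  · have hb := PySem.Int.floordiv_two_mid_bounds h
    omega
  · have hb := PySem.Int.floordiv_two_mid_bounds h
    omega

def in_bisect (sorted_list : List String) (target : String) : Bool :=
  inBisectLoop sorted_list target 0 ((sorted_list.length : Int) - 1)

-- word[start::step]; step is 2 (never 0) at every call site, so slice? is always `some`
def extract_letters (word : String) (start step : Int) : String :=
  (PySem.Str.slice? word (some start) none step).getD ""

def find_interlocked_pairs (words : List String) : List (String × String × String) :=
  words.foldl
    (fun pairs word =>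
      let word1 := extract_letters word 0 2
      let word2 := extract_letters word 1 2
      if in_bisect words word1 && in_bisect words word2 then pairs ++ [(word, word1, word2)]
      else pairs)
    []

-- ===== PORT B =====
-- recursive binary search on slices: empty base case, midpoint (len-1)//2, recurse into
-- lst[mid+1:] or lst[:mid]
def inBisectRec (sorted_list : List String) (target : String) : Bool :=
  if hemp : sorted_list.isEmpty then false
  else
    let mid := PySem.Int.floordiv ((sorted_list.length : Int) - 1) 2
    match PySem.List.pyGet? sorted_list mid with
    | none => false
    | some x =>
      if x = target then true
      else if x < target then
        inBisectRec (PySem.List.slice sorted_list (some (mid + 1)) none) target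
      else
        inBisectRec (PySem.List.slice sorted_list none (some mid)) target
termination_by sorted_list.length
decreasing_by
  · have hlen : 1 ≤ sorted_list.length := by
      cases sorted_list with
      | nil => simp at hemp
      | cons a l => simp
    have hmid : PySem.Int.floordiv ((sorted_list.length : Int) - 1) 2
        = ((sorted_list.length : Int) - 1) / 2 :=
      PySem.Int.floordiv_eq_ediv_of_pos (by norm_num)
    rw [PySem.List.slice_from sorted_list (by omega)]
    simp only [List.length_drop]
    omega
  · have hlen : 1 ≤ sorted_list.length := by
      cases sorted_list with
      | nil => simp at hemp
      | cons a l => simp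
    have hmid : PySem.Int.floordiv ((sorted_list.length : Int) - 1) 2
        = ((sorted_list.length : Int) - 1) / 2 :=
      PySem.Int.floordiv_eq_ediv_of_pos (by norm_num)
    rw [PySem.List.slice_to sorted_list (by omega)]
    simp only [List.length_take]
    omega

def find_interlocked_pairs_alt (words : List String) : List (String × String × String) :=
  words.filterMap (fun w =>
    let w1 := (PySem.Str.slice? w (some 0) none 2).getD ""
    let w2 := (PySem.Str.slice? w (some 1) none 2).getD ""
    if inBisectRec words w1 && inBisectRec words w2 then some (w, w1, w2) else none)

-- ===== PRECONDITION & SPEC =====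
def Spec_find_interlocked_pairs (words : List String) (out : List (String × String × String)) : Prop := out = find_interlocked_pairs_alt words
instance (words : List String) (out : List (String × String × String)) : Decidable (Spec_find_interlocked_pairs words out) := by unfold Spec_find_interlocked_pairs; infer_instance

-- ===== CLAIM (what is proved, stated in full; the proofs are below) =====
def Claim_equal_find_interlocked_pairs : Prop := ∀ (words : List String), Dom_find_interlocked_pairs words → Spec_find_interlocked_pairs words (find_interlocked_pairs words)

-- ===== LEMMAS AND PROOFS =====

-- A's loop on (low, high) computes B's recursive search on the slice l[low : high+1]
lemma loop_eq_rec (l : List String) (t : String) :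
    ∀ (n : Nat) (low high : Int), (high + 1 - low).toNat = n → 0 ≤ low → low - 1 ≤ high →
      high < (l.length : Int) →
      inBisectLoop l t low high = inBisectRec (PySem.List.slice l (some low) (some (high + 1))) t := by
  intro n
  induction n using Nat.strong_induction_on with
  | _ n ih =>
    intro low high hn h0 h1 h2
    have hsub : PySem.List.slice l (some low) (some (high + 1))
        = (l.drop low.toNat).take ((high + 1).toNat - low.toNat) :=
      PySem.List.slice_toNat l h0 (by omega)
    by_cases hle : low ≤ high
    · -- one step of the loop
      have hmidb := PySem.Int.floordiv_two_mid_bounds hle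
      set midA := PySem.Int.floordiv (low + high) 2 with hmidA
      have hgetA : PySem.List.pyGet? l midA = some l[midA.toNat] :=
        PySem.List.pyGet?_eq_some_getElem l (by omega) (by omega)
      -- the slice side
      have hlensub : (PySem.List.slice l (some low) (some (high + 1))).length
          = (high + 1).toNat - low.toNat := by
        rw [hsub]; simp [List.length_take, List.length_drop]; omega
      have hne : ¬ (PySem.List.slice l (some low) (some (high + 1))).isEmpty := by
        rw [List.isEmpty_iff_length_eq_zero, hlensub]; omega
      have hmidB : PySem.Int.floordiv
          (((PySem.List.slice l (some low) (some (high + 1))).length : Int) - 1) 2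
          = midA - low := by
        rw [hlensub, hmidA]
        rw [PySem.Int.floordiv_eq_ediv_of_pos (by norm_num : (0:Int) < 2),
            PySem.Int.floordiv_eq_ediv_of_pos (by norm_num : (0:Int) < 2)]
        omega
      have hmidBrange : (0:Int) ≤ midA - low ∧ midA - low <
          ((PySem.List.slice l (some low) (some (high + 1))).length : Int) := by
        rw [hlensub]; constructor <;> omega
      have hgetB : PySem.List.pyGet? (PySem.List.slice l (some low) (some (high + 1)))
          (midA - low) = some l[midA.toNat] := by
        rw [PySem.List.pyGet?_eq_some_getElem _ hmidBrange.1 hmidBrange.2]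
        congr 1
        rw [List.getElem_of_eq hsub, List.getElem_take, List.getElem_drop]
        congr 1
        omega
      rw [inBisectLoop, dif_pos hle, inBisectRec, dif_neg hne]
      simp only [hmidB, hgetA, hgetB, ← hmidA]
      by_cases heq : l[midA.toNat] = t
      · simp [heq]
      · by_cases hlt : l[midA.toNat] < t
        · simp only [heq, if_false, hlt, if_true]
          -- recurse right: l[midA+1 : high+1]
          have hslice : PySem.List.slice (PySem.List.slice l (some low) (some (high + 1)))
              (some (midA - low + 1)) none
              = PySem.List.slice l (some (midA + 1)) (some (high + 1)) := by
            rw [PySem.List.slice_from _ (by omega), hsub,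
                PySem.List.slice_toNat l (by omega) (by omega)]
            rw [List.drop_take, List.drop_drop]
            have e1 : low.toNat + (midA - low + 1).toNat = (midA + 1).toNat := by omega
            have e2 : (high + 1).toNat - low.toNat - (midA - low + 1).toNat
                = (high + 1).toNat - (midA + 1).toNat := by omega
            rw [e1, e2]
          rw [hslice]
          exact ih ((high + 1 - (midA + 1)).toNat) (by omega) (midA + 1) high rfl
            (by omega) (by omega) h2
        · simp only [heq, if_false, hlt, if_false]
          -- recurse left: l[low : midA]
          have hslice : PySem.List.slice (PySem.List.slice l (some low) (some (high + 1)))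
              none (some (midA - low))
              = PySem.List.slice l (some low) (some (midA - 1 + 1)) := by
            rw [PySem.List.slice_to _ (by omega), hsub,
                PySem.List.slice_toNat l h0 (by omega)]
            rw [List.take_take]
            congr 1
            omega
          rw [hslice]
          exact ih ((midA - 1 + 1 - low).toNat) (by omega) low (midA - 1) rfl h0
            (by omega) (by omega)
    · -- loop exits; the slice is empty
      have hempty : PySem.List.slice l (some low) (some (high + 1)) = [] := by
        rw [hsub]
        have : (high + 1).toNat - low.toNat = 0 := by omega
        simp [this]
      rw [inBisectLoop, dif_neg hle, hempty, inBisectRec]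
      simp

lemma in_bisect_eq_rec (l : List String) (t : String) : in_bisect l t = inBisectRec l t := by
  unfold in_bisect
  rw [loop_eq_rec l t ((l.length : Int) - 1 + 1 - 0).toNat 0 ((l.length : Int) - 1) rfl
      (by omega) (by omega) (by omega)]
  congr 1
  have : ((l.length : Int) - 1 + 1) = ((l.length : Nat) : Int) := by omega
  rw [this, PySem.List.slice_toNat l (by omega) (by omega)]
  simp

-- the append loop of A equals B's comprehension (filterMap), with A's searches rewritten
lemma foldl_eq_filterMap (words : List String) :
    ∀ (l : List String) (acc : List (String × String × String)),
      l.foldl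
        (fun pairs word =>
          let word1 := extract_letters word 0 2
          let word2 := extract_letters word 1 2
          if in_bisect words word1 && in_bisect words word2 then pairs ++ [(word, word1, word2)]
          else pairs)
        acc
      = acc ++ l.filterMap (fun w =>
          let w1 := (PySem.Str.slice? w (some 0) none 2).getD ""
          let w2 := (PySem.Str.slice? w (some 1) none 2).getD ""
          if inBisectRec words w1 && inBisectRec words w2 then some (w, w1, w2) else none) := by
  intro l
  induction l with
  | nil => intro acc; simp
  | cons w l ih =>
    intro acc
    simp only [List.foldl_cons, List.filterMap_cons]
    rw [ih]
    simp only [extract_letters, in_bisect_eq_rec]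
    by_cases hc : inBisectRec words ((PySem.Str.slice? w (some 0) none 2).getD "")
        && inBisectRec words ((PySem.Str.slice? w (some 1) none 2).getD "")
    · simp [hc]
    · simp [hc]

-- ===== VERDICT (by name: the statement is the Claim_ definition above) =====
theorem find_interlocked_pairs_spec : Claim_equal_find_interlocked_pairs := by
  intro words _
  unfold Spec_find_interlocked_pairs find_interlocked_pairs find_interlocked_pairs_alt
  rw [foldl_eq_filterMap words words []]
  simp
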